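-- pv_equiv track=rewrite | github.com/wangpuxiong/person_persenton | fastapi/citation_system/src/highlighter.py | _build_highlighted_text
-- ===== SOURCE A (Python) =====
-- from typing import List, Dict, Tuple
--
-- def _build_highlighted_text(tokens: List[str], positions: set) -> str:
--     """构建高亮文本"""
--     highlighted = []
--     for i, token in enumerate(tokens):
--         if i in positions:
--             highlighted.append(f"**{token}**")
--         else:
--             highlighted.append(token)
--     return " ".join(highlighted)
-- ===== SOURCE B (Python) =====
-- def _build_highlighted_text(tokens, positions):
--     """Copy the token list and overwrite only the highlighted entries,
--     driving the loop over the (deduplicated) positions instead of over all tokens."""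
--     result = list(tokens)
--     for i in set(positions):
--         if 0 <= i < len(result):
--             result[i] = f"**{result[i]}**"
--     return " ".join(result)
-- ===== Notes on version B (the rewrite author's own statement) =====
-- stated objective: alternative
-- what changed: B copies the token list and loops over the deduplicated positions, overwriting only highlighted entries (with a bounds guard), instead of scanning every token and testing membership in positions.
import Mathlib
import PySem

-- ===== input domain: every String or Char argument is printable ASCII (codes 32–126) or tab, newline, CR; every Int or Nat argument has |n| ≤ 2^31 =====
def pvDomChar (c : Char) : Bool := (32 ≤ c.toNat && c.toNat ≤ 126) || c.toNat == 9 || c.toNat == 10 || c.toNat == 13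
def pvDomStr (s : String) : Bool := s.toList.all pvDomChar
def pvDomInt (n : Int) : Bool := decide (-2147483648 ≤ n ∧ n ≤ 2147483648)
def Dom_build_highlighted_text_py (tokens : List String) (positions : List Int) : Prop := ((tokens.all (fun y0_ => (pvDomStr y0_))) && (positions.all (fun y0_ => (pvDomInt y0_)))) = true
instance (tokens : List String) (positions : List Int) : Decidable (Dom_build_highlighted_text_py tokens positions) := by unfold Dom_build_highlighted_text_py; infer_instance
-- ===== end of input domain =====

-- ===== PORT A =====
-- A: enumerate the tokens, appending the (possibly bold-wrapped) token for each index.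
def build_highlighted_text_py (tokens : List String) (positions : List Int) : String :=
  let highlighted : List String :=
    (PySem.List.enumerate tokens).foldl
      (fun acc p =>
        if positions.contains p.1 then acc ++ ["**" ++ p.2 ++ "**"]
        else acc ++ [p.2]) []
  PySem.Str.join " " highlighted

-- ===== PORT B =====
-- B: copy the tokens, then for each distinct in-range position overwrite that entry with its bold form.
def bhtAltStep (res : List String) (i : Int) : List String :=
  if 0 ≤ i ∧ i < (res.length : Int) then
    res.set i.toNat ("**" ++ res.getD i.toNat "" ++ "**")
  else res

def build_highlighted_text_py_alt (tokens : List String) (positions : List Int) : String :=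
  PySem.Str.join " " ((PySem.Set.ofList positions).foldl bhtAltStep tokens)

-- ===== PRECONDITION & SPEC =====
def Spec_build_highlighted_text_py (tokens : List String) (positions : List Int) (out : String) : Prop := out = build_highlighted_text_py_alt tokens positions
instance (tokens : List String) (positions : List Int) (out : String) : Decidable (Spec_build_highlighted_text_py tokens positions out) := by unfold Spec_build_highlighted_text_py; infer_instance

-- ===== CLAIM (what is proved, stated in full; the proofs are below) =====
def Claim_equal_build_highlighted_text_py : Prop := ∀ (tokens : List String) (positions : List Int), Dom_build_highlighted_text_py tokens positions → Spec_build_highlighted_text_py tokens positions (build_highlighted_text_py tokens positions)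

-- ===== LEMMAS AND PROOFS =====

theorem bht_A_fold (positions : List Int) (l : List (Int × String)) (acc : List String) :
    l.foldl
      (fun acc p =>
        if positions.contains p.1 then acc ++ ["**" ++ p.2 ++ "**"]
        else acc ++ [p.2]) acc =
    acc ++ l.map (fun p => if positions.contains p.1 then "**" ++ p.2 ++ "**" else p.2) := by
  induction l generalizing acc with
  | nil => simp
  | cons x xs ih =>
    rw [List.foldl_cons, ih, List.map_cons]
    split_ifs <;> simp

theorem bht_step_length (res : List String) (i : Int) :
    (bhtAltStep res i).length = res.length := by
  unfold bhtAltStep; split <;> simp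

theorem bht_fold_length (ps : List Int) (res : List String) :
    (ps.foldl bhtAltStep res).length = res.length := by
  induction ps generalizing res with
  | nil => rfl
  | cons p ps ih => simp [List.foldl_cons, ih, bht_step_length]

theorem bht_fold_get (ps : List Int) (hps : ps.Nodup) (res : List String)
    (j : Nat) (hj : j < res.length) :
    (ps.foldl bhtAltStep res)[j]? =
      some (if (j : Int) ∈ ps then "**" ++ res.getD j "" ++ "**" else res.getD j "") := by
  induction ps generalizing res with
  | nil => simp [List.getElem?_eq_getElem hj, List.getD_eq_getElem?_getD]
  | cons p ps ih =>
    rcases List.nodup_cons.mp hps with ⟨hpn, hnd⟩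
    have hjlen : j < (bhtAltStep res p).length := by rw [bht_step_length]; exact hj
    rw [List.foldl_cons, ih hnd (bhtAltStep res p) hjlen]
    by_cases hpj : (j : Int) = p
    · subst hpj
      have hguard : 0 ≤ (j : Int) ∧ (j : Int) < (res.length : Int) := by
        exact ⟨Int.natCast_nonneg j, by exact_mod_cast hj⟩
      have hset : bhtAltStep res j = res.set j ("**" ++ res.getD j "" ++ "**") := by
        unfold bhtAltStep
        rw [if_pos hguard]
        simp
      rw [if_neg hpn, hset]
      simp [List.getD_eq_getElem?_getD, hj]
    · have hget : (bhtAltStep res p).getD j "" = res.getD j "" := by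
        unfold bhtAltStep
        split
        · next hg =>
          have hne : p.toNat ≠ j := by omega
          simp [List.getD_eq_getElem?_getD, List.getElem?_set_ne hne]
        · rfl
      rw [hget]
      have hmemiff : ((j : Int) ∈ p :: ps) ↔ ((j : Int) ∈ ps) := by
        simp [List.mem_cons, hpj]
      by_cases hm : (j : Int) ∈ ps
      · rw [if_pos hm, if_pos (hmemiff.mpr hm)]
      · rw [if_neg hm, if_neg (fun h => hm (hmemiff.mp h))]

theorem bht_lists_eq (tokens : List String) (positions : List Int) :
    (PySem.List.enumerate tokens).foldl
      (fun acc p =>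
        if positions.contains p.1 then acc ++ ["**" ++ p.2 ++ "**"]
        else acc ++ [p.2]) [] =
    (PySem.Set.ofList positions).foldl bhtAltStep tokens := by
  rw [bht_A_fold]
  apply List.ext_getElem?
  intro j
  by_cases hj : j < tokens.length
  · rw [bht_fold_get _ (PySem.Set.nodup_ofList positions) tokens j hj]
    have hjm : j < (PySem.List.enumerate tokens).length := by
      simp [PySem.List.length_enumerate]; exact hj
    rw [List.nil_append, List.getElem?_map, List.getElem?_eq_getElem hjm,
      PySem.List.getElem_enumerate]
    have hmem : ((j : Int) ∈ PySem.Set.ofList positions) ↔ ((j : Int) ∈ positions) := by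
      simpa using PySem.Set.mem_ofList positions ((j : Int))
    by_cases hc : (j : Int) ∈ positions
    · simp [hc, hmem, List.getD_eq_getElem?_getD, List.getElem?_eq_getElem hj]
    · simp [hc, hmem, List.getD_eq_getElem?_getD, List.getElem?_eq_getElem hj]
  · rw [List.getElem?_eq_none, List.getElem?_eq_none]
    · rw [bht_fold_length]; omega
    · simp [PySem.List.length_enumerate]; omega

-- ===== VERDICT (by name: the statement is the Claim_ definition above) =====
theorem build_highlighted_text_py_spec : Claim_equal_build_highlighted_text_py := by
  intro tokens positions _
  unfold Spec_build_highlighted_text_py build_highlighted_text_py build_highlighted_text_py_alt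
  rw [bht_lists_eq]
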